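-- pv_equiv track=rewrite | github.com/skopczynski/DataMiningFinal | main.py | compute_frequencies
-- ===== SOURCE A (Python) =====
-- def compute_frequencies(values, cutoffs):
--     freqs = [0] * len(cutoffs)
--     for val in values:
--         for i, cutoff in enumerate(cutoffs):
--             if val <= cutoff:
--                 freqs[i] += 1
--                 break
--     return freqs
-- ===== SOURCE B (Python) =====
-- def compute_frequencies(values, cutoffs):
--     freqs = []
--     prevmax = None
--     for cutoff in cutoffs:
--         if prevmax is None:
--             freqs.append(sum(1 for v in values if v <= cutoff))
--             prevmax = cutoff
--         else:
--             freqs.append(sum(1 for v in values if prevmax < v <= cutoff))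
--             prevmax = max(prevmax, cutoff)
--     return freqs
-- ===== Notes on version B (the rewrite author's own statement) =====
-- stated objective: alternative
-- what changed: B swaps the loop nesting: instead of scanning cutoffs for each value with break, it loops once over cutoffs maintaining the running prefix maximum and counts, per bucket, the values lying in (prefix-max, cutoff]; first-match-by-position becomes an interval count.
import Mathlib
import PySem

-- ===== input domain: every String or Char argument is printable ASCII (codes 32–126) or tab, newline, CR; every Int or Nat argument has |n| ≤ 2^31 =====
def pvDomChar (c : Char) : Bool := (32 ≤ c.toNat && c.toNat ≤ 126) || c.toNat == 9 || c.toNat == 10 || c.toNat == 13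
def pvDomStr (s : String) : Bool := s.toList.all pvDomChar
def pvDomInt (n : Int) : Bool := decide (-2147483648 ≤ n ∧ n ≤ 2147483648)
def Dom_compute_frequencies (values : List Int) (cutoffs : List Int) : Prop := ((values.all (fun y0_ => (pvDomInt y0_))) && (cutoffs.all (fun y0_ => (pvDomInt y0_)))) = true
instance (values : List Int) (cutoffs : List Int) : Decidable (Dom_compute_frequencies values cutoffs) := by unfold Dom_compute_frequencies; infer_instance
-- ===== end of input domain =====

-- B changes the loop nesting of A (per-value scan with break → per-bucket interval count via a
-- running prefix maximum); same cost, return values proved identical on all inputs.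

-- ===== PORT A =====
-- inner 'for i, cutoff in enumerate(cutoffs): if val <= cutoff: freqs[i] += 1; break'
def pvAStep (val : Int) (freqs : List Int) : List (Int × Int) → List Int
  | [] => freqs
  | (i, cutoff) :: rest =>
    if val ≤ cutoff then freqs.set i.toNat (freqs.getD i.toNat 0 + 1)
    else pvAStep val freqs rest

def compute_frequencies (values : List Int) (cutoffs : List Int) : List Int :=
  values.foldl (fun freqs val => pvAStep val freqs (PySem.List.enumerate cutoffs 0))
    (List.replicate cutoffs.length 0)

-- ===== PORT B =====
-- 'for cutoff in cutoffs' maintaining prevmax (None before the first bucket)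
def pvBGo (values : List Int) (prevmax : Option Int) : List Int → List Int
  | [] => []
  | cutoff :: rest =>
    match prevmax with
    | none => ((values.countP (fun v => decide (v ≤ cutoff))) : Int)
        :: pvBGo values (some cutoff) rest
    | some m => ((values.countP (fun v => decide (m < v) && decide (v ≤ cutoff))) : Int)
        :: pvBGo values (some (max m cutoff)) rest

def compute_frequencies_alt (values : List Int) (cutoffs : List Int) : List Int :=
  pvBGo values none cutoffs

-- ===== PRECONDITION & SPEC =====
def Spec_compute_frequencies (values : List Int) (cutoffs : List Int) (out : List Int) : Prop := out = compute_frequencies_alt values cutoffs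
instance (values : List Int) (cutoffs : List Int) (out : List Int) : Decidable (Spec_compute_frequencies values cutoffs out) := by unfold Spec_compute_frequencies; infer_instance

-- ===== CLAIM (what is proved, stated in full; the proofs are below) =====
def Claim_equal_compute_frequencies : Prop := ∀ (values : List Int) (cutoffs : List Int), Dom_compute_frequencies values cutoffs → Spec_compute_frequencies values cutoffs (compute_frequencies values cutoffs)

-- ===== LEMMAS AND PROOFS =====

-- common reference function: counts per bucket, filtering out already-bucketed values
def gSpec : List Int → List Int → List Int
  | _, [] => []
  | vals, c :: cs =>
    ((vals.countP (fun v => decide (v ≤ c))) : Int)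
      :: gSpec (vals.filter (fun v => !decide (v ≤ c))) cs

-- index of the first cutoff a value fits under
def firstIdx : List Int → Int → Option Nat
  | [], _ => none
  | c :: cs, v => if v ≤ c then some 0 else (firstIdx cs v).map (· + 1)

-- increment position k+i (if any)
def bump (k : Nat) (l : List Int) : Option Nat → List Int
  | none => l
  | some i => l.set (k + i) (l.getD (k + i) 0 + 1)

theorem length_gSpec (vals cs : List Int) : (gSpec vals cs).length = cs.length := by
  induction cs generalizing vals with
  | nil => simp [gSpec]
  | cons c cs ih => simp [gSpec, ih]

theorem gSpec_nil (cs : List Int) : gSpec [] cs = List.replicate cs.length 0 := by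
  induction cs with
  | nil => simp [gSpec]
  | cons c cs ih => simp [gSpec, ih, List.replicate_succ]

theorem firstIdx_lt {cs : List Int} {v : Int} {i : Nat}
    (h : firstIdx cs v = some i) : i < cs.length := by
  induction cs generalizing i with
  | nil => simp [firstIdx] at h
  | cons c cs ih =>
    by_cases hc : v ≤ c
    · simp only [firstIdx, if_pos hc, Option.some.injEq] at h
      simp [← h]
    · simp only [firstIdx, if_neg hc] at h
      cases hf : firstIdx cs v with
      | none => rw [hf] at h; simp at h
      | some j =>
        rw [hf] at h
        simp only [Option.map_some, Option.some.injEq] at h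
        have := ih hf
        simp [← h]
        omega

theorem pvAStep_enum (cutoffs : List Int) (val : Int) (freqs : List Int) (k : Nat) :
    pvAStep val freqs (PySem.List.enumerate cutoffs (k : Int)) =
      bump k freqs (firstIdx cutoffs val) := by
  induction cutoffs generalizing k with
  | nil => simp [PySem.List.enumerate_nil, pvAStep, firstIdx, bump]
  | cons c cs ih =>
    rw [PySem.List.enumerate_cons]
    by_cases hc : val ≤ c
    · simp [pvAStep, hc, firstIdx, bump]
    · rw [pvAStep, if_neg hc]
      have hk : (k : Int) + 1 = ((k + 1 : Nat) : Int) := by push_cast; ring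
      rw [hk, ih]
      simp only [firstIdx, if_neg hc]
      cases hf : firstIdx cs val with
      | none => simp [bump]
      | some i =>
        simp only [Option.map_some, bump]
        have e : k + 1 + i = k + (i + 1) := by omega
        rw [e]

theorem pvAStep_enum0 (cutoffs : List Int) (val : Int) (freqs : List Int) :
    pvAStep val freqs (PySem.List.enumerate cutoffs 0) =
      bump 0 freqs (firstIdx cutoffs val) := by
  have := pvAStep_enum cutoffs val freqs 0
  simpa using this

theorem gSpec_cons (cutoffs vs : List Int) (v : Int) :
    gSpec (v :: vs) cutoffs = bump 0 (gSpec vs cutoffs) (firstIdx cutoffs v) := by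
  induction cutoffs generalizing vs with
  | nil => simp [gSpec, firstIdx, bump]
  | cons c cs ih =>
    by_cases hc : v ≤ c
    · simp [gSpec, firstIdx, hc, bump]
    · have hd : decide (v ≤ c) = false := decide_eq_false hc
      simp only [gSpec, firstIdx, if_neg hc, List.filter_cons, List.countP_cons, hd,
        Bool.not_false, if_true, if_false, Bool.false_eq_true, add_zero]
      rw [ih]
      cases hf : firstIdx cs v with
      | none => simp [bump]
      | some i =>
        simp only [Option.map_some, bump, Nat.zero_add]
        simp [List.set_cons_succ]

theorem zip_set (f g : List Int) (i : Nat) (hl : f.length = g.length) (hi : i < f.length) :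
    List.zipWith (· + ·) (f.set i (f.getD i 0 + 1)) g
      = List.zipWith (· + ·) f (g.set i (g.getD i 0 + 1)) := by
  induction f generalizing g i with
  | nil => simp at hi
  | cons a f ih =>
    cases g with
    | nil => simp at hl
    | cons b g =>
      cases i with
      | zero => simp [List.getD]; ring
      | succ i =>
        simp only [List.getD_cons_succ, List.set_cons_succ, List.zipWith_cons_cons]
        rw [ih]
        · simpa using hl
        · simpa using hi

theorem zip_replicate_left (g : List Int) :
    List.zipWith (· + ·) (List.replicate g.length 0) g = g := by
  induction g with
  | nil => simp
  | cons b g ih => simp [List.replicate_succ, ih]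

theorem zip_replicate_right (f : List Int) :
    List.zipWith (· + ·) f (List.replicate f.length 0) = f := by
  induction f with
  | nil => simp
  | cons a f ih => simp [List.replicate_succ, ih]

theorem foldA (cutoffs values freqs : List Int) (hl : freqs.length = cutoffs.length) :
    values.foldl (fun freqs val => pvAStep val freqs (PySem.List.enumerate cutoffs 0)) freqs
      = List.zipWith (· + ·) freqs (gSpec values cutoffs) := by
  induction values generalizing freqs with
  | nil =>
    simp only [List.foldl_nil, gSpec_nil, ← hl]
    exact (zip_replicate_right freqs).symm
  | cons v vs ih =>
    rw [List.foldl_cons, pvAStep_enum0, gSpec_cons]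
    cases h : firstIdx cutoffs v with
    | none => exact ih freqs hl
    | some i =>
      have hi : i < cutoffs.length := firstIdx_lt h
      simp only [bump, Nat.zero_add]
      rw [ih _ (by simpa using hl)]
      exact zip_set freqs (gSpec vs cutoffs) i
        (by rw [length_gSpec]; exact hl) (by omega)

theorem pvBGo_some (cs : List Int) (values : List Int) (m : Int) :
    pvBGo values (some m) cs = gSpec (values.filter (fun v => decide (m < v))) cs := by
  induction cs generalizing values m with
  | nil => simp [pvBGo, gSpec]
  | cons c cs ih =>
    simp only [pvBGo, gSpec]
    congr 1
    · rw [List.countP_filter]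
      exact congrArg _ (List.countP_congr fun v _ => by rw [Bool.and_comm])
    · rw [ih, List.filter_filter]
      congr 1
      refine List.filter_congr fun v _ => ?_
      by_cases h1 : m < v <;> by_cases h2 : v ≤ c <;> simp [h1, h2] <;> omega

theorem pvBGo_none (cs values : List Int) : pvBGo values none cs = gSpec values cs := by
  cases cs with
  | nil => simp [pvBGo, gSpec]
  | cons c cs =>
    simp only [pvBGo, gSpec]
    congr 1
    rw [pvBGo_some]
    congr 1
    refine List.filter_congr fun v _ => ?_
    by_cases h2 : v ≤ c <;> simp [h2] <;> omega

-- ===== VERDICT (by name: the statement is the Claim_ definition above) =====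
theorem compute_frequencies_spec : Claim_equal_compute_frequencies := by
  intro values cutoffs _
  show compute_frequencies values cutoffs = compute_frequencies_alt values cutoffs
  rw [compute_frequencies, compute_frequencies_alt, pvBGo_none,
    foldA cutoffs values _ (by simp), ← length_gSpec values cutoffs]
  exact zip_replicate_left _
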